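-- pv_equiv track=rewrite | github.com/shivam-singh-au17/Accomplish_classes- | Tests-All/Month-Test/august-mont/DSA/MakeStringsEqual.py | stringsEqual
-- ===== SOURCE A (Python) =====
-- def stringsEqual(str1, str2):
--
--     addStr = str1 + str2
--     obj = {}
--
--     for key in addStr:
--         if key not in obj:
--             obj[key] = 1
--         else:
--             obj[key] += 1
--
--     for k in obj:
--         if obj[k] % 2 != 0:
--             return False
--
--     return True
-- ===== SOURCE B (Python) =====
-- def stringsEqual(str1, str2):
--     odd = set()
--     for c in str1 + str2:
--         if c in odd:
--             odd.discard(c)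
--         else:
--             odd.add(c)
--     return not odd
-- ===== Notes on version B (the rewrite author's own statement) =====
-- stated objective: simpler
-- what changed: Replaces the frequency-count dict plus a second key-scan mod-2 loop with a single toggle pass over a parity set (add if absent, discard if present) and an emptiness test.
import Mathlib
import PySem

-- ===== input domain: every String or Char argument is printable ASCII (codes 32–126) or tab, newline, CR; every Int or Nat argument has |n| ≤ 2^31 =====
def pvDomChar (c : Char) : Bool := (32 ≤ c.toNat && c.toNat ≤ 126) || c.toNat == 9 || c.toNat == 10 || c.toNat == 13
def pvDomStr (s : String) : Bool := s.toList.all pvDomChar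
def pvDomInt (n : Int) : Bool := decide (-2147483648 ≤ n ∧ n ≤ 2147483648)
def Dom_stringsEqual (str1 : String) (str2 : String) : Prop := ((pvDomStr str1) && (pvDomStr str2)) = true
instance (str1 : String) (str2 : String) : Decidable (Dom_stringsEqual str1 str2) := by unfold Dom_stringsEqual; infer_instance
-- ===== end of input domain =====

-- B replaces A's frequency-count dict + second mod-2 key scan with a single parity-toggle set pass (simpler).


-- ===== PORT A =====
-- second loop of A: first key with odd count returns False, else True
def pvCheckEven (d : PySem.Dict Char Int) : List Char → Bool
  | [] => true
  | k :: ks => if (PySem.Int.mod (d.getD k 0) 2 != 0) then false else pvCheckEven d ks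

def stringsEqual (str1 : String) (str2 : String) : Bool :=
  let addStr := str1.toList ++ str2.toList
  let obj := addStr.foldl
    (fun d key => if d.contains key = false then d.insert key 1 else d.insert key (d.getD key 0 + 1))
    PySem.Dict.empty
  pvCheckEven obj obj.keys

-- ===== PORT B =====
def pvToggle (s : PySem.Set Char) (c : Char) : PySem.Set Char :=
  if PySem.Set.contains s c then PySem.Set.discard s c else PySem.Set.add s c

def stringsEqual_alt (str1 : String) (str2 : String) : Bool :=
  ((str1.toList ++ str2.toList).foldl pvToggle PySem.Set.empty).isEmpty

-- ===== PRECONDITION & SPEC =====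
def Spec_stringsEqual (str1 : String) (str2 : String) (out : Bool) : Prop := out = stringsEqual_alt str1 str2
instance (str1 : String) (str2 : String) (out : Bool) : Decidable (Spec_stringsEqual str1 str2 out) := by unfold Spec_stringsEqual; infer_instance

-- ===== CLAIM (what is proved, stated in full; the proofs are below) =====
def Claim_equal_stringsEqual : Prop := ∀ (str1 : String) (str2 : String), Dom_stringsEqual str1 str2 → Spec_stringsEqual str1 str2 (stringsEqual str1 str2)

-- ===== LEMMAS AND PROOFS =====

lemma pvStepA_eq :
    (fun (d : PySem.Dict Char Int) key =>
      if d.contains key = false then d.insert key 1 else d.insert key (d.getD key 0 + 1))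
    = (fun (d : PySem.Dict Char Int) x => d.insert x (d.getD x 0 + 1)) := by
  funext d x
  by_cases h : d.contains x = false
  · simp [h, PySem.Dict.getD_of_not_contains]
  · simp [h]

lemma pvCheckEven_iff (d : PySem.Dict Char Int) (ks : List Char) :
    pvCheckEven d ks = true ↔ ∀ k ∈ ks, PySem.Int.mod (d.getD k 0) 2 = 0 := by
  induction ks with
  | nil => simp [pvCheckEven]
  | cons k ks ih =>
    simp only [pvCheckEven]
    by_cases h : PySem.Int.mod (d.getD k 0) 2 = 0 <;> simp [h, ih]

lemma pvMem_toggle (s : PySem.Set Char) (x c : Char) :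
    c ∈ pvToggle s x ↔ (if c = x then c ∉ s else c ∈ s) := by
  unfold pvToggle
  by_cases hx : x ∈ s
  · rw [if_pos (by simpa [PySem.Set.contains_iff] using hx)]
    by_cases hc : c = x <;> simp [PySem.Set.mem_discard, hc, hx]
  · rw [if_neg (by simpa [PySem.Set.contains_iff] using hx)]
    by_cases hc : c = x <;> simp [hc, hx]

lemma pvMem_toggle_fold (l : List Char) :
    ∀ (s : PySem.Set Char) (c : Char),
      c ∈ l.foldl pvToggle s ↔ (if c ∈ s then l.count c % 2 = 0 else l.count c % 2 = 1) := by
  induction l with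
  | nil => intro s c; simp
  | cons x xs ih =>
    intro s c
    rw [List.foldl_cons, ih (pvToggle s x) c, List.count_cons]
    by_cases hc : c = x
    · subst hc
      by_cases hs : c ∈ s <;> simp [pvMem_toggle, hs] <;> omega
    · have hxc : ¬ x = c := fun h => hc h.symm
      simp [pvMem_toggle, hc, hxc]

theorem pv_main (l : List Char) :
    pvCheckEven (l.foldl (fun (d : PySem.Dict Char Int) x => d.insert x (d.getD x 0 + 1)) PySem.Dict.empty)
      (l.foldl (fun (d : PySem.Dict Char Int) x => d.insert x (d.getD x 0 + 1)) PySem.Dict.empty).keys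
    = (l.foldl pvToggle PySem.Set.empty).isEmpty := by
  rw [Bool.eq_iff_iff, pvCheckEven_iff, List.isEmpty_iff, List.eq_nil_iff_forall_not_mem]
  constructor
  · intro h c hc
    rw [pvMem_toggle_fold] at hc
    simp only [PySem.Set.empty, List.not_mem_nil, if_false] at hc
    by_cases hmem : c ∈ (l.foldl (fun (d : PySem.Dict Char Int) x => d.insert x (d.getD x 0 + 1)) PySem.Dict.empty).keys
    · have := h c hmem
      rw [PySem.Dict.getD_foldl_insert_add_one, PySem.Dict.getD_empty] at this
      simp only [zero_add] at this
      rw [PySem.Int.mod_eq_emod_of_pos (by norm_num)] at this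
      omega
    · rw [PySem.Dict.keys_foldl_insert] at hmem
      simp only [PySem.Dict.keys_empty] at hmem
      rw [PySem.Set.update_nil_left, PySem.Set.mem_ofList] at hmem
      rw [List.count_eq_zero_of_not_mem hmem] at hc
      omega
  · intro h k hk
    have hc := h k
    rw [pvMem_toggle_fold] at hc
    simp only [PySem.Set.empty, List.not_mem_nil, if_false] at hc
    rw [PySem.Dict.getD_foldl_insert_add_one, PySem.Dict.getD_empty]
    simp only [zero_add]
    rw [PySem.Int.mod_eq_emod_of_pos (by norm_num)]
    omega

-- ===== VERDICT (by name: the statement is the Claim_ definition above) =====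
theorem stringsEqual_spec : Claim_equal_stringsEqual := by
  intro str1 str2 _
  simp only [Spec_stringsEqual, stringsEqual, stringsEqual_alt, pvStepA_eq]
  exact pv_main (str1.toList ++ str2.toList)
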